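-- pv_equiv track=rewrite | github.com/rzamarefat/DAS-related | Udemy - Ace Coding Interview with 100 Algorithms Challenge in Python/73_Longest_Digits_Prefix.py | longest_digit_prefix
-- ===== SOURCE A (Python) =====
-- def longest_digit_prefix(string):
--     digit_prefix = ""
--     for char in string:
--         if char.isdigit():
--             digit_prefix += char
--         else:
--             return digit_prefix
--
--     return digit_prefix
-- ===== SOURCE B (Python) =====
-- def longest_digit_prefix(string):
--     i = 0
--     n = len(string)
--     while i < n and string[i].isdigit():
--         i += 1
--     return string[:i]
-- ===== Notes on version B (the rewrite author's own statement) =====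
-- stated objective: simpler
-- what changed: B tracks only the boundary index with a while loop and returns one slice, instead of growing an accumulator string and returning early from a for loop.
import Mathlib
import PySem

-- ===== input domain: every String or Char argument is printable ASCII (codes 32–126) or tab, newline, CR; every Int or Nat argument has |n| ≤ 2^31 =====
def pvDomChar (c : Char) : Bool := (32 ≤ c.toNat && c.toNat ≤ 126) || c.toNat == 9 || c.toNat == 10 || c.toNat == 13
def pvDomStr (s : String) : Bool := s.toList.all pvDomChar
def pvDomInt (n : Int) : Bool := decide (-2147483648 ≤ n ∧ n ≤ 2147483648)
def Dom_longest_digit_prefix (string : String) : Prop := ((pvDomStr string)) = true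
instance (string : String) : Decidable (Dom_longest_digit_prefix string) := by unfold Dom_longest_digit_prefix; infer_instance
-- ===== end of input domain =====

-- B tracks only the boundary index of the first non-digit and returns one slice, instead of
-- growing an accumulator string and returning early (objective: simpler).


-- ===== PORT A =====
-- the for-loop with early return: accumulator of digit chars, stop at the first non-digit
def pvALoop : List Char → List Char → List Char
  | [], acc => acc
  | c :: cs, acc => if PySem.Chars.isdigit c then pvALoop cs (acc ++ [c]) else acc

def longest_digit_prefix (string : String) : String :=
  String.mk (pvALoop string.toList [])

-- ===== PORT B =====
-- the while loop 'while i < n and string[i].isdigit(): i += 1', as structural recursion on the rest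
def pvBIdx : List Char → Nat
  | [] => 0
  | c :: cs => if PySem.Chars.isdigit c then 1 + pvBIdx cs else 0

def longest_digit_prefix_alt (string : String) : String :=
  -- string[:i] with 0 ≤ i is take i (PySem.List.slice_to_natCast)
  String.mk (string.toList.take (pvBIdx string.toList))

-- ===== PRECONDITION & SPEC =====
def Spec_longest_digit_prefix (string : String) (out : String) : Prop := out = longest_digit_prefix_alt string
instance (string : String) (out : String) : Decidable (Spec_longest_digit_prefix string out) := by unfold Spec_longest_digit_prefix; infer_instance

-- ===== CLAIM (what is proved, stated in full; the proofs are below) =====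
def Claim_equal_longest_digit_prefix : Prop := ∀ (string : String), Dom_longest_digit_prefix string → Spec_longest_digit_prefix string (longest_digit_prefix string)

-- ===== LEMMAS AND PROOFS =====
theorem pvALoop_eq_take (l acc : List Char) : pvALoop l acc = acc ++ l.take (pvBIdx l) := by
  induction l generalizing acc with
  | nil => simp [pvALoop, pvBIdx]
  | cons c cs ih =>
    simp only [pvALoop, pvBIdx]
    split
    · simp [ih, List.take_succ_cons, Nat.add_comm]
    · simp

-- ===== VERDICT (by name: the statement is the Claim_ definition above) =====
theorem longest_digit_prefix_spec : Claim_equal_longest_digit_prefix := by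
  intro s _
  show _ = _
  simp [longest_digit_prefix, longest_digit_prefix_alt, pvALoop_eq_take]
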